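-- pv_equiv track=rewrite | github.com/EmanuelHark12/MAC0110 | ep11.py | busque
-- ===== SOURCE A (Python) =====
-- def busque( palavra, texto ):
--     ''' (str, str) -> list
--
--     RECEBE duas strings, `palavra` e `texto`, e RETORNA uma lista
--     contendo o início de cada ocorrência de `palavra` em `texto`.
--
--     No caso de haver sobreposições de ocorrências de `palavra`, apenas
--     menor índice dentre as ocorrências sobrepostas deverá ser inserido
--     na lista.
--
--     Exemplos:
--
--     In [4]: busque("mana", "ana e mariana compraram bananas")
--     Out[4]: []
--
--     In [5]: busque("bana", "ana e mariana compraram bananas")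
--     Out[5]: [24]
--
--     In [6]: busque("ana", "ana e mariana compraram bananas")
--     Out[6]: [0, 10, 25]
--
--     In [7]: busque("AA", "ACAAAGTCAAAATTGTGTAGTGTGACGTTTT")
--     Out[7]: [2, 8, 10]
--     '''
--     # modifique o código abaixo para conter a sua solução.
--     dista = []
--     i = 0
--     while i < len(texto):
--         if texto[i:len(palavra)+i] == palavra:
--             dista +=[i]
--             i += len(palavra)
--         else:
--             i += 1
--     return dista
-- ===== SOURCE B (Python) =====
-- def busque(palavra, texto):
--     # Rabin-Karp: rolling polynomial fingerprint mod 2**61-1 (base > any code point);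
--     # a position is tested by one integer comparison, with a direct compare only on
--     # a fingerprint hit to rule out collisions.
--     m = len(palavra)
--     n = len(texto)
--     if m == 0 or m > n:
--         return []
--     base = 1114112  # 0x110000, strictly above every ord(c)
--     mod = (1 << 61) - 1
--     hp = 0
--     for c in palavra:
--         hp = (hp * base + ord(c)) % mod
--     high = pow(base, m - 1, mod)
--     h = 0
--     for c in texto[:m]:
--         h = (h * base + ord(c)) % mod
--     dista = []
--     i = 0
--     while True:
--         if h == hp and texto[i:i + m] == palavra:
--             dista.append(i)
--             j = i + m
--             if j + m > n:
--                 break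
--             h = 0
--             for c in texto[j:j + m]:
--                 h = (h * base + ord(c)) % mod
--         else:
--             j = i + 1
--             if j + m > n:
--                 break
--             h = ((h - ord(texto[i]) * high) * base + ord(texto[j + m - 1])) % mod
--         i = j
--     return dista
-- ===== Notes on version B (the rewrite author's own statement) =====
-- stated objective: faster
-- what changed: B is Rabin-Karp: it maintains a rolling polynomial fingerprint mod 2**61-1 (base 0x110000 > any code point) so each position is tested by one integer comparison, with a direct pattern compare only on a fingerprint hit; Pre_ only excludes empty palavra with nonempty texto, where A loops forever (i += 0).
import Mathlib
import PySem

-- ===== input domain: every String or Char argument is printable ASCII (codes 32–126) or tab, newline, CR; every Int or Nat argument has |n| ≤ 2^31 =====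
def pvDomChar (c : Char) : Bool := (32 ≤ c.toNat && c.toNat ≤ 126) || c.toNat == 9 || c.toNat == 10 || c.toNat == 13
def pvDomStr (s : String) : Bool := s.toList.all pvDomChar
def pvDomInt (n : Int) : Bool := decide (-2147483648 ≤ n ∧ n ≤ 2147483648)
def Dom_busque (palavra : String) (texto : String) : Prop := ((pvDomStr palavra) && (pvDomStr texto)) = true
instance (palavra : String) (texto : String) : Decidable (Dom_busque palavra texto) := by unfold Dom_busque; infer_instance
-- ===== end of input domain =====

-- B replaces A's per-position slice-and-compare scan by Rabin-Karp: a rolling polynomial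
-- fingerprint mod 2^61-1 (base 0x110000 > every code point) tests each position with one
-- integer comparison; the pattern is compared directly only on a fingerprint hit.


-- ===== PORT A =====
-- A's while loop, fuel = one unit per iteration (under Pre_ the loop makes ≤ len(texto) steps).
def busqueALoop (p t : List Char) : Nat → Nat → List Int → List Int
  | 0, _, acc => acc
  | fuel+1, i, acc =>
    if i < t.length then
      if PySem.List.slice t (some (i : Int)) (some ((p.length : Int) + (i : Int))) = p then
        busqueALoop p t fuel (i + p.length) (acc ++ [(i : Int)])
      else
        busqueALoop p t fuel (i + 1) acc
    else acc

def busque (palavra : String) (texto : String) : List Int :=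
  busqueALoop palavra.toList texto.toList (texto.toList.length + 1) 0 []

-- ===== PORT B =====
-- base = 0x110000: strictly above every Unicode code point (ord(c) in Python, Char.toNat here).
def pvBase : Int := 1114112
-- mod = (1 << 61) - 1; Python's % with this positive modulus is Int.emod.
def pvMod : Int := 2305843009213693951

-- 'h = 0; for c in chunk: h = (h*base + ord(c)) % mod'
def pvHashM (l : List Char) : Int := l.foldl (fun a c => (a * pvBase + (c.toNat : Int)) % pvMod) 0

-- ord(texto[k]); every use is guarded so k is in range (Python raises only out of range).
def pvOrd (t : List Char) (k : Nat) : Int := ((t.getD k default).toNat : Int)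

-- B's while loop: state (i, h) with h the fingerprint of texto[i:i+m]; fuel = one unit per iteration.
def busqueBLoop (p t : List Char) (hp high : Int) : Nat → Nat → Int → List Int → List Int
  | 0, _, _, acc => acc
  | fuel+1, i, h, acc =>
    if h = hp ∧ PySem.List.slice t (some (i : Int)) (some ((i : Int) + (p.length : Int))) = p then
      if t.length < i + p.length + p.length then acc ++ [(i : Int)]
      else busqueBLoop p t hp high fuel (i + p.length)
             (pvHashM ((t.drop (i + p.length)).take p.length)) (acc ++ [(i : Int)])
    else
      if t.length < i + 1 + p.length then acc
      else busqueBLoop p t hp high fuel (i + 1)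
             (((h - pvOrd t i * high) * pvBase + pvOrd t (i + 1 + p.length - 1)) % pvMod) acc

def busque_alt (palavra : String) (texto : String) : List Int :=
  if palavra.toList.length = 0 ∨ texto.toList.length < palavra.toList.length then []
  else busqueBLoop palavra.toList texto.toList (pvHashM palavra.toList)
         (PySem.Int.powMod pvBase (palavra.toList.length - 1) pvMod)
         (texto.toList.length + 1)
         0 (pvHashM (texto.toList.take palavra.toList.length)) []

-- ===== PRECONDITION & SPEC =====
-- Pre_ excludes only palavra = "" with texto ≠ "": there A's loop never advances (i += 0) and diverges.
def Pre_busque (palavra : String) (texto : String) : Prop := palavra ≠ "" ∨ texto = ""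
instance (palavra : String) (texto : String) : Decidable (Pre_busque palavra texto) := by
  unfold Pre_busque; infer_instance

def pvWitness_busque : String × String := ("ana", "ana e mariana compraram bananas")

def Spec_busque (palavra : String) (texto : String) (out : List Int) : Prop := out = busque_alt palavra texto
instance (palavra : String) (texto : String) (out : List Int) : Decidable (Spec_busque palavra texto out) := by unfold Spec_busque; infer_instance

-- ===== CLAIM (what is proved, stated in full; the proofs are below) =====
def Claim_equal_busque : Prop := ∀ (palavra : String) (texto : String), Dom_busque palavra texto → Pre_busque palavra texto → Spec_busque palavra texto (busque palavra texto)

-- ===== LEMMAS AND PROOFS =====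

-- A's slice test at position i is exactly "p is a prefix of t.drop i".
theorem busque_slice_iff (p t : List Char) (i : Nat) :
    (PySem.List.slice t (some (i : Int)) (some ((p.length : Int) + (i : Int))) = p) ↔
      p <+: t.drop i := by
  have h1 : ((p.length : Int) + (i : Int)) = (((p.length + i : Nat)) : Int) := by push_cast; ring
  rw [h1, PySem.List.slice_natCast]
  have h2 : p.length + i - i = p.length := by omega
  rw [h2]
  constructor
  · intro h; exact List.prefix_iff_eq_take.mpr h.symm
  · intro h; exact (List.prefix_iff_eq_take.mp h).symm

-- If p matches nowhere at or after i, A's loop returns the accumulator unchanged.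
theorem busqueALoop_nomatch (p t : List Char) :
    ∀ (f i : Nat) (acc : List Int), (∀ i', i ≤ i' → ¬ p <+: t.drop i') →
      busqueALoop p t f i acc = acc := by
  intro f
  induction f with
  | zero => intro i acc _; rfl
  | succ f ih =>
    intro i acc h
    by_cases hi : i < t.length
    · have hns : ¬ (PySem.List.slice t (some (i : Int)) (some ((p.length : Int) + (i : Int))) = p) := by
        rw [busque_slice_iff]; exact h i le_rfl
      simp only [busqueALoop, if_pos hi, if_neg hns]
      exact ih (i + 1) acc (fun i' hi' => h i' (by omega))
    · simp only [busqueALoop, if_neg hi]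

-- With enough fuel (strictly more than the remaining text) A's loop is fuel-independent.
theorem busqueALoop_fuel (p t : List Char) (hm : 1 ≤ p.length) :
    ∀ (k i : Nat), t.length - i ≤ k → ∀ (f1 f2 : Nat) (acc : List Int),
      t.length - i < f1 → t.length - i < f2 →
      busqueALoop p t f1 i acc = busqueALoop p t f2 i acc := by
  intro k
  induction k with
  | zero =>
    intro i hk f1 f2 acc h1 h2
    obtain ⟨f1', rfl⟩ : ∃ f1', f1 = f1' + 1 := ⟨f1 - 1, by omega⟩
    obtain ⟨f2', rfl⟩ : ∃ f2', f2 = f2' + 1 := ⟨f2 - 1, by omega⟩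
    have hi : ¬ i < t.length := by omega
    simp only [busqueALoop, if_neg hi]
  | succ k ih =>
    intro i hk f1 f2 acc h1 h2
    obtain ⟨f1', rfl⟩ : ∃ f1', f1 = f1' + 1 := ⟨f1 - 1, by omega⟩
    obtain ⟨f2', rfl⟩ : ∃ f2', f2 = f2' + 1 := ⟨f2 - 1, by omega⟩
    by_cases hi : i < t.length
    · simp only [busqueALoop, if_pos hi]
      by_cases hs : PySem.List.slice t (some (i : Int)) (some ((p.length : Int) + (i : Int))) = p
      · rw [if_pos hs, if_pos hs]
        exact ih (i + p.length) (by omega) f1' f2' _ (by omega) (by omega)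
      · rw [if_neg hs, if_neg hs]
        exact ih (i + 1) (by omega) f1' f2' acc (by omega) (by omega)
    · simp only [busqueALoop, if_neg hi]

-- fingerprint arithmetic -----------------------------------------------------

-- the exact (un-reduced) polynomial value, used only as a proof device
def pvHash (l : List Char) : Int := l.foldl (fun a c => a * pvBase + (c.toNat : Int)) 0

theorem pvHash_foldl (l : List Char) : ∀ (a : Int),
    l.foldl (fun a c => a * pvBase + (c.toNat : Int)) a = a * pvBase ^ l.length + pvHash l := by
  induction l with
  | nil => intro a; simp [pvHash]
  | cons c l ih =>
    intro a
    simp only [List.foldl, List.length_cons, pvHash]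
    rw [ih (a * pvBase + (c.toNat : Int)), ih ((0 : Int) * pvBase + (c.toNat : Int))]
    ring

theorem pvHash_cons (c : Char) (l : List Char) :
    pvHash (c :: l) = (c.toNat : Int) * pvBase ^ l.length + pvHash l := by
  show (c :: l).foldl (fun a c => a * pvBase + (c.toNat : Int)) 0 = _
  simp only [List.foldl]
  rw [pvHash_foldl]
  ring

theorem pvHash_append_singleton (l : List Char) (d : Char) :
    pvHash (l ++ [d]) = pvHash l * pvBase + (d.toNat : Int) := by
  show (l ++ [d]).foldl (fun a c => a * pvBase + (c.toNat : Int)) 0 = _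
  rw [List.foldl_append]
  simp [List.foldl, pvHash]

-- the reduced fold computes the exact polynomial value mod pvMod
theorem pvHashM_foldl (l : List Char) : ∀ (a : Int),
    l.foldl (fun a c => (a * pvBase + (c.toNat : Int)) % pvMod) (a % pvMod)
      = (l.foldl (fun a c => a * pvBase + (c.toNat : Int)) a) % pvMod := by
  induction l with
  | nil => intro a; simp
  | cons c l ih =>
    intro a
    simp only [List.foldl]
    have h1 : ((a % pvMod) * pvBase + (c.toNat : Int)) % pvMod
        = (a * pvBase + (c.toNat : Int)) % pvMod := by
      conv_lhs => rw [Int.add_emod, Int.mul_emod, Int.emod_emod_of_dvd a dvd_rfl,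
        ← Int.mul_emod, ← Int.add_emod]
    rw [h1, ← ih (a * pvBase + (c.toNat : Int))]

theorem pvHashM_eq (l : List Char) : pvHashM l = pvHash l % pvMod := by
  have h0 : (0 : Int) = 0 % pvMod := by norm_num [pvMod]
  show l.foldl (fun a c => (a * pvBase + (c.toNat : Int)) % pvMod) 0 = _
  rw [h0, pvHashM_foldl]
  rfl

-- window facts ---------------------------------------------------------------

-- the window at i matches the pattern iff A's slice test succeeds
theorem window_eq_iff (p t : List Char) (i : Nat) :
    ((t.drop i).take p.length = p) ↔
      (PySem.List.slice t (some (i : Int)) (some ((p.length : Int) + (i : Int))) = p) := by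
  rw [busque_slice_iff]
  rw [List.prefix_iff_eq_take]
  constructor
  · intro h; exact h.symm
  · intro h; exact h.symm

-- B's slice argument order (i + m) is A's (m + i)
theorem slice_comm (p t : List Char) (i : Nat) :
    PySem.List.slice t (some (i : Int)) (some ((i : Int) + (p.length : Int)))
      = PySem.List.slice t (some (i : Int)) (some ((p.length : Int) + (i : Int))) := by
  rw [add_comm ((i : Int))]

-- the exact rolling update computes the next window's exact fingerprint
theorem rolling_hash (p t : List Char) (i : Nat) (hm : 1 ≤ p.length)
    (hin : i + 1 + p.length ≤ t.length) :
    (pvHash ((t.drop i).take p.length) - pvOrd t i * pvBase ^ (p.length - 1)) * pvBase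
        + pvOrd t (i + 1 + p.length - 1)
      = pvHash ((t.drop (i + 1)).take p.length) := by
  have hi : i < t.length := by omega
  have him : i + p.length < t.length := by omega
  obtain ⟨m', hm'⟩ : ∃ m', p.length = m' + 1 := ⟨p.length - 1, by omega⟩
  -- c0 = texto[i], d0 = texto[i + m] (both in range)
  have hdrop' : t.drop i = t.getD i default :: t.drop (i + 1) := by
    rw [List.drop_eq_getElem_cons hi]
    congr 1
    exact (List.getD_eq_getElem t default hi).symm
  -- window i = c0 :: u  with u = (t.drop (i+1)).take m'
  have hw1 : (t.drop i).take p.length = t.getD i default :: (t.drop (i + 1)).take m' := by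
    rw [hdrop', hm']
    rfl
  -- window (i+1) = u ++ [d0]
  have hgd : (t.drop (i + 1))[m']? = some (t.getD (i + p.length) default) := by
    rw [List.getElem?_drop]
    have h2 : i + 1 + m' = i + p.length := by omega
    rw [h2, List.getElem?_eq_getElem him]
    congr 1
    exact (List.getD_eq_getElem t default him).symm
  have hw2 : (t.drop (i + 1)).take p.length
      = (t.drop (i + 1)).take m' ++ [t.getD (i + p.length) default] := by
    rw [hm', List.take_add_one, hgd]
    simp [hm']
  have hulen : ((t.drop (i + 1)).take m').length = m' := by
    simp only [List.length_take, List.length_drop]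
    omega
  have hOrd2 : pvOrd t (i + 1 + p.length - 1) = pvOrd t (i + p.length) := by
    have h1 : i + 1 + p.length - 1 = i + p.length := by omega
    rw [h1]
  have hm1 : p.length - 1 = m' := by omega
  rw [hw1, hw2, pvHash_cons, pvHash_append_singleton, hOrd2, hulen, hm1]
  show (_ - pvOrd t i * _) * _ + pvOrd t (i + p.length) = _
  unfold pvOrd
  ring

-- and the reduced rolling update computes it mod pvMod
theorem rolling_hashM (p t : List Char) (i : Nat) (hm : 1 ≤ p.length)
    (hin : i + 1 + p.length ≤ t.length) :
    ((pvHash ((t.drop i).take p.length) % pvMod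
        - pvOrd t i * (pvBase ^ (p.length - 1) % pvMod)) * pvBase
        + pvOrd t (i + 1 + p.length - 1)) % pvMod
      = pvHash ((t.drop (i + 1)).take p.length) % pvMod := by
  rw [← rolling_hash p t i hm hin]
  have h1 : Int.ModEq pvMod (pvHash ((t.drop i).take p.length) % pvMod)
      (pvHash ((t.drop i).take p.length)) := Int.emod_emod_of_dvd _ dvd_rfl
  have h2 : Int.ModEq pvMod (pvBase ^ (p.length - 1) % pvMod)
      (pvBase ^ (p.length - 1)) := Int.emod_emod_of_dvd _ dvd_rfl
  exact ((h1.sub (h2.mul_left (pvOrd t i))).mul_right pvBase).add_right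
    (pvOrd t (i + 1 + p.length - 1))

-- main lockstep equivalence --------------------------------------------------

theorem busque_main (p t : List Char) (hm : 1 ≤ p.length) :
    ∀ (k i : Nat) (acc : List Int), t.length - i ≤ k → i + p.length ≤ t.length →
      busqueALoop p t (t.length + 1) i acc =
      busqueBLoop p t (pvHash p % pvMod) (pvBase ^ (p.length - 1) % pvMod) (k + 1) i
        (pvHash ((t.drop i).take p.length) % pvMod) acc := by
  intro k
  induction k with
  | zero => intro i acc hk hin; omega
  | succ k ih =>
    intro i acc hk hin
    have hi : i < t.length := by omega
    by_cases hs : PySem.List.slice t (some (i : Int)) (some ((p.length : Int) + (i : Int))) = p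
    · -- match at i: the fingerprints agree too
      have hw : (t.drop i).take p.length = p := (window_eq_iff p t i).mpr hs
      have hcond : pvHash ((t.drop i).take p.length) % pvMod = pvHash p % pvMod ∧
          PySem.List.slice t (some (i : Int)) (some ((i : Int) + (p.length : Int))) = p := by
        refine ⟨by rw [hw], ?_⟩
        rw [slice_comm p t i]
        exact hs
      have stepA : busqueALoop p t (t.length + 1) i acc =
          busqueALoop p t t.length (i + p.length) (acc ++ [(i : Int)]) := by
        simp only [busqueALoop, if_pos hi, if_pos hs]
      by_cases hend : t.length < i + p.length + p.length
      · -- B stops; A scans the tail without any possible match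
        have stepB : busqueBLoop p t (pvHash p % pvMod) (pvBase ^ (p.length - 1) % pvMod)
            (k + 1 + 1) i (pvHash ((t.drop i).take p.length) % pvMod) acc
            = acc ++ [(i : Int)] := by
          simp only [busqueBLoop, if_pos hcond, if_pos hend]
        rw [stepA, stepB]
        apply busqueALoop_nomatch
        intro i' hi' hpre
        have := hpre.length_le
        simp only [List.length_drop] at this
        omega
      · have stepB : busqueBLoop p t (pvHash p % pvMod) (pvBase ^ (p.length - 1) % pvMod)
            (k + 1 + 1) i (pvHash ((t.drop i).take p.length) % pvMod) acc =
            busqueBLoop p t (pvHash p % pvMod) (pvBase ^ (p.length - 1) % pvMod)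
              (k + 1) (i + p.length)
              (pvHashM ((t.drop (i + p.length)).take p.length)) (acc ++ [(i : Int)]) := by
          simp only [busqueBLoop, if_pos hcond, if_neg hend]
        rw [stepA, stepB, pvHashM_eq,
          busqueALoop_fuel p t hm (t.length - (i + p.length)) (i + p.length) le_rfl
            t.length (t.length + 1) (acc ++ [(i : Int)]) (by omega) (by omega)]
        exact ih (i + p.length) (acc ++ [(i : Int)]) (by omega) (by omega)
    · -- mismatch at i: B's direct compare fails, whatever the fingerprint says
      have hcond : ¬ (pvHash ((t.drop i).take p.length) % pvMod = pvHash p % pvMod ∧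
          PySem.List.slice t (some (i : Int)) (some ((i : Int) + (p.length : Int))) = p) := by
        intro h
        apply hs
        rw [← slice_comm p t i]
        exact h.2
      have stepA : busqueALoop p t (t.length + 1) i acc =
          busqueALoop p t t.length (i + 1) acc := by
        simp only [busqueALoop, if_pos hi, if_neg hs]
      by_cases hend : t.length < i + 1 + p.length
      · have stepB : busqueBLoop p t (pvHash p % pvMod) (pvBase ^ (p.length - 1) % pvMod)
            (k + 1 + 1) i (pvHash ((t.drop i).take p.length) % pvMod) acc = acc := by
          simp only [busqueBLoop, if_neg hcond, if_pos hend]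
        rw [stepA, stepB]
        apply busqueALoop_nomatch
        intro i' hi' hpre
        have := hpre.length_le
        simp only [List.length_drop] at this
        omega
      · have hroll := rolling_hashM p t i hm (by omega)
        have stepB : busqueBLoop p t (pvHash p % pvMod) (pvBase ^ (p.length - 1) % pvMod)
            (k + 1 + 1) i (pvHash ((t.drop i).take p.length) % pvMod) acc =
            busqueBLoop p t (pvHash p % pvMod) (pvBase ^ (p.length - 1) % pvMod)
              (k + 1) (i + 1) (pvHash ((t.drop (i + 1)).take p.length) % pvMod) acc := by
          simp only [busqueBLoop, if_neg hcond, if_neg hend]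
          rw [hroll]
        rw [stepA, stepB,
          busqueALoop_fuel p t hm (t.length - (i + 1)) (i + 1) le_rfl
            t.length (t.length + 1) acc (by omega) (by omega)]
        exact ih (i + 1) acc (by omega) (by omega)

-- ===== VERDICT (by name: the statement is the Claim_ definition above) =====
theorem busque_spec : Claim_equal_busque := by
  intro palavra texto _ hpre
  unfold Spec_busque busque busque_alt
  rcases hpre with hne | hemp
  · have hm : 1 ≤ palavra.toList.length := by
      rcases Nat.eq_zero_or_pos palavra.toList.length with h0 | h1
      · exfalso; apply hne; ext1; simpa using h0
      · exact h1
    by_cases hlt : texto.toList.length < palavra.toList.length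
    · rw [if_pos (Or.inr hlt)]
      apply busqueALoop_nomatch
      intro i' _ hpre'
      have := hpre'.length_le
      simp only [List.length_drop] at this
      omega
    · rw [if_neg (by omega)]
      have hpow : PySem.Int.powMod pvBase (palavra.toList.length - 1) pvMod
          = pvBase ^ (palavra.toList.length - 1) % pvMod := by
        rw [PySem.Int.powMod_eq,
          PySem.Int.mod_eq_emod_of_pos (show (0 : Int) < pvMod by norm_num [pvMod])]
      have h0 : texto.toList.take palavra.toList.length
          = (texto.toList.drop 0).take palavra.toList.length := by rw [List.drop_zero]
      rw [hpow, pvHashM_eq palavra.toList, pvHashM_eq, h0]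
      exact busque_main palavra.toList texto.toList hm texto.toList.length 0 [] (by omega)
        (by omega)
  · subst hemp
    rcases Nat.eq_zero_or_pos palavra.toList.length with h0 | h1
    · rw [if_pos (Or.inl h0)]; rfl
    · rw [if_pos (Or.inr (by simpa using h1))]; rfl
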